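-- pv_equiv track=rewrite | github.com/dahee325/algo | 최빈값구하기/sol.py | solution
-- ===== SOURCE A (Python) =====
-- def solution(array):
--     dic = {}
--     v = []
--
--     for num in array:
--         if num in dic.keys():
--             dic[num] += 1
--         else:
--             dic[num] = 1
--
--     max_num = max(dic.values())
--     for key, value in dic.items():
--         if value == max_num:
--             v.append(key)
--
--     if len(v) == 1:
--         return v[0]
--     else:
--         return -1
-- ===== SOURCE B (Python) =====
-- def solution(array):
--     # Sort-and-group: walk consecutive equal runs of the sorted array instead of
--     # hash-counting; same result (unique mode, else -1).
--     s = sorted(array)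
--     runs = []
--     i, n = 0, len(s)
--     while i < n:
--         j = i + 1
--         while j < n and s[j] == s[i]:
--             j += 1
--         runs.append((j - i, s[i]))
--         i = j
--     max_count = max(c for c, _ in runs)
--     cands = [v for c, v in runs if c == max_count]
--     return cands[0] if len(cands) == 1 else -1
-- ===== Notes on version B (the rewrite author's own statement) =====
-- stated objective: alternative
-- what changed: Replaces A's hash-map counting plus a scan over dict items with sorting the array and walking consecutive equal runs, taking the value of the unique longest run.
import Mathlib
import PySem

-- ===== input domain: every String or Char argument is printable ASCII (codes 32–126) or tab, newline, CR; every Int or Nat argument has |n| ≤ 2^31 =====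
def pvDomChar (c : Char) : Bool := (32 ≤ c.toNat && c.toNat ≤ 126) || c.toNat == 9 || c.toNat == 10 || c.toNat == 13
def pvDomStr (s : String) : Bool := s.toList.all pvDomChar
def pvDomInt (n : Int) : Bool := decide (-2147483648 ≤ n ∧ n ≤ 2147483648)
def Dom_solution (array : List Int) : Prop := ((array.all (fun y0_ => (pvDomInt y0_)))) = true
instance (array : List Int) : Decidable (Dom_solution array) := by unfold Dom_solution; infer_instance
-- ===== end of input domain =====

-- B replaces A's hash-map counting + dict-items scan by sorting the array and walking
-- consecutive equal runs (a different algorithm of similar cost); equal on all nonempty inputs.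


-- ===== PORT A =====
def solution (array : List Int) : Int :=
  let dic := array.foldl (fun d num =>
    if d.contains num then d.modify num 0 (· + 1) else d.insert num 1)
    (PySem.Dict.empty : PySem.Dict Int Int)
  match PySem.List.max? dic.values (fun v => v) with
  | none => -1   -- unreachable: Python's max raises ValueError here (empty array, excluded by Pre_)
  | some maxNum =>
    let v := dic.items.foldl (fun v kv => if kv.2 == maxNum then v ++ [kv.1] else v) []
    if v.length = 1 then v.headD (-1) else -1

-- ===== PORT B =====
-- the run-grouping loop of Source B: consecutive equal runs as (length, value) pairs
def runsOf : List Int → List (Int × Int)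
  | [] => []
  | x :: t =>
    (((t.takeWhile (· == x)).length : Int) + 1, x) :: runsOf (t.dropWhile (· == x))
termination_by l => l.length
decreasing_by
  simpa [Nat.lt_succ_iff] using List.length_dropWhile_le (· == x) t

def solution_alt (array : List Int) : Int :=
  let runs := runsOf (PySem.List.sorted array (fun x => x) false)
  match PySem.List.max? (runs.map (·.1)) (fun c => c) with
  | none => -1   -- unreachable: Python's max raises ValueError here (empty array, excluded by Pre_)
  | some m =>
    let cands := (runs.filter (fun r => r.1 == m)).map (·.2)
    if cands.length = 1 then cands.headD (-1) else -1

-- ===== PRECONDITION & SPEC =====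
-- Pre_ excludes only the empty list, on which Python A raises ValueError (max of empty dict values);
-- B raises ValueError there too (max of the empty run list).
def Pre_solution (array : List Int) : Prop := array ≠ []
instance (array : List Int) : Decidable (Pre_solution array) := by unfold Pre_solution; infer_instance
def pvWitness_solution : List Int := [1, 2, 2]
def Spec_solution (array : List Int) (out : Int) : Prop := out = solution_alt array
instance (array : List Int) (out : Int) : Decidable (Spec_solution array out) := by unfold Spec_solution; infer_instance

-- ===== CLAIM (what is proved, stated in full; the proofs are below) =====
def Claim_equal_solution : Prop := ∀ (array : List Int), Dom_solution array → Pre_solution array → Spec_solution array (solution array)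

-- ===== LEMMAS AND PROOFS =====

-- everything after the maximal equal-head run of a sorted list is strictly larger than the head
lemma dropWhile_gt (x : Int) (t : List Int) (hs : (x :: t).Pairwise (· ≤ ·)) :
    ∀ y ∈ t.dropWhile (· == x), x < y := by
  intro y hy
  have hxt : ∀ y ∈ t, x ≤ y := (List.pairwise_cons.mp hs).1
  have hpt : t.Pairwise (· ≤ ·) := (List.pairwise_cons.mp hs).2
  have hsub := List.dropWhile_sublist (l := t) (p := (· == x))
  have hpd : (t.dropWhile (· == x)).Pairwise (· ≤ ·) := hpt.sublist hsub
  cases hd : t.dropWhile (· == x) with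
  | nil => simp [hd] at hy
  | cons h0 r =>
    have hh0 : ¬ (h0 == x) = true := by
      have := List.head?_dropWhile_not (p := (· == x)) (l := t)
      rw [hd] at this; simpa using this
    have hxh0 : x < h0 := by
      have : h0 ∈ t := hsub.mem (by rw [hd]; exact List.mem_cons_self)
      have := hxt h0 this
      simp at hh0; omega
    rw [hd] at hy
    rcases List.mem_cons.mp hy with rfl | hyr
    · exact hxh0
    · have : h0 ≤ y := (List.pairwise_cons.mp (hd ▸ hpd)).1 y hyr
      omega


-- runsOf on a sorted list: runs carry distinct values, covering the list, with their counts
lemma runsOf_sorted_props (s : List Int) (hs : s.Pairwise (· ≤ ·)) :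
    ((∀ k, k ∈ (runsOf s).map (·.2) ↔ k ∈ s) ∧
     ((runsOf s).map (·.2)).Nodup ∧
     (∀ r ∈ runsOf s, r.1 = (s.count r.2 : Int))) := by
  induction s using runsOf.induct with
  | case1 => simp [runsOf]
  | case2 x t ih =>
    have hxt : ∀ y ∈ t, x ≤ y := (List.pairwise_cons.mp hs).1
    have hpt : t.Pairwise (· ≤ ·) := (List.pairwise_cons.mp hs).2
    have hgt := dropWhile_gt x t hs
    have hsubd := List.dropWhile_sublist (l := t) (p := (· == x))
    have hpd : (t.dropWhile (· == x)).Pairwise (· ≤ ·) := hpt.sublist hsubd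
    obtain ⟨ihmem, ihnd, ihcnt⟩ := ih hpd
    have hsplit : t.takeWhile (· == x) ++ t.dropWhile (· == x) = t :=
      List.takeWhile_append_dropWhile
    have hpre : ∀ y ∈ t.takeWhile (· == x), y = x := by
      intro y hy
      simpa using List.mem_takeWhile_imp hy
    have hcnt_split : ∀ k : Int, t.count k =
        (t.takeWhile (· == x)).count k + (t.dropWhile (· == x)).count k := by
      intro k
      have h := congrArg (List.count k) hsplit
      rw [List.count_append] at h
      exact h.symm
    have hmemt : ∀ k : Int, k ∈ t ↔ k ∈ t.takeWhile (· == x) ∨ k ∈ t.dropWhile (· == x) := by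
      intro k
      have := congrArg (fun l => k ∈ l) hsplit
      simp only [eq_iff_iff, List.mem_append] at this
      exact this.symm
    refine ⟨?_, ?_, ?_⟩
    · intro k
      rw [runsOf]
      simp only [List.map_cons, List.mem_cons, ihmem]
      constructor
      · rintro (rfl | hk)
        · exact Or.inl rfl
        · exact Or.inr (hsubd.mem hk)
      · rintro (rfl | hkt)
        · exact Or.inl rfl
        · rcases (hmemt k).mp hkt with h | h
          · exact Or.inl (hpre k h)
          · exact Or.inr h
    · rw [runsOf]
      simp only [List.map_cons, List.nodup_cons]
      refine ⟨fun hx => ?_, ihnd⟩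
      exact absurd (hgt x ((ihmem x).mp hx)) (by omega)
    · rw [runsOf]
      intro r hr
      rcases List.mem_cons.mp hr with rfl | hrt
      · simp only
        have h1 : (t.takeWhile (· == x)).count x = (t.takeWhile (· == x)).length :=
          List.count_eq_length.mpr (fun y hy => by simp [hpre y hy])
        have h2 : (t.dropWhile (· == x)).count x = 0 :=
          List.count_eq_zero.mpr (fun hx => absurd (hgt x hx) (by omega))
        have hcx : (x :: t).count x = (t.takeWhile (· == x)).length + 1 := by
          rw [List.count_cons_self, hcnt_split x, h1, h2]
        rw [hcx]; push_cast; ring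
      · have hrs : r.2 ∈ t.dropWhile (· == x) :=
          (ihmem r.2).mp (List.mem_map_of_mem hrt)
        have hne : r.2 ≠ x := fun h => absurd (hgt _ hrs) (by omega)
        have hpc : (t.takeWhile (· == x)).count r.2 = 0 :=
          List.count_eq_zero.mpr (fun h => hne (hpre _ h))
        have : (x :: t).count r.2 = (t.dropWhile (· == x)).count r.2 := by
          rw [List.count_cons_of_ne hne.symm, hcnt_split r.2, hpc]; omega
        rw [this]; exact ihcnt r hrt


-- A's counting loop builds collections.Counter(array)
lemma solution_foldl_counter (array : List Int) :
    array.foldl (fun d num => if d.contains num then d.modify num 0 (· + 1) else d.insert num 1) PySem.Dict.empty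
    = PySem.Dict.counter array := by
  have hstep : (fun (d : PySem.Dict Int Int) num => if d.contains num then d.modify num 0 (· + 1) else d.insert num 1)
      = fun d num => d.modify num 0 (· + 1) := by
    funext d x
    split_ifs with h
    · rfl
    · rw [PySem.Dict.modify, PySem.Dict.getD_of_not_contains (h := by simpa using h)]
      norm_num
  rw [hstep, PySem.Dict.counter_eq_foldl]


-- ===== VERDICT (by name: the statement is the Claim_ definition above) =====
theorem solution_spec : Claim_equal_solution := by
  intro array _ hpre
  unfold Spec_solution
  obtain ⟨a0, ha0⟩ := List.exists_mem_of_ne_nil array hpre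
  set s := PySem.List.sorted array (fun x => x) false with hsdef
  have hperm : s.Perm array := PySem.List.sorted_perm array _ _
  have hpair : s.Pairwise (· ≤ ·) := by
    simpa using PySem.List.sorted_pairwise array (fun x => x)
  obtain ⟨rmem, rnd, rcnt⟩ := runsOf_sorted_props s hpair
  have hcountseq : ∀ k : Int, s.count k = array.count k := fun k => hperm.count_eq k
  have hmems : ∀ k : Int, k ∈ s ↔ k ∈ array := fun k => hperm.mem_iff
  have hdic := solution_foldl_counter array
  have hitems := PySem.Dict.items_counter (xs := array)
  have hvalsA : (PySem.Dict.counter array).values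
      = (PySem.Set.ofList array).map (fun k => ((array.count k : Nat) : Int)) := by
    show ((PySem.Dict.counter array).items).map (·.2) = _
    rw [hitems]
    simp [List.map_map, Function.comp_def]
  have hmemvalsA : ∀ w : Int, w ∈ (PySem.Dict.counter array).values ↔
      ∃ k, k ∈ array ∧ w = (array.count k : Int) := by
    intro w
    rw [hvalsA]
    simp only [List.mem_map, PySem.Set.mem_ofList]
    constructor
    · rintro ⟨k, hk, rfl⟩; exact ⟨k, hk, rfl⟩
    · rintro ⟨k, hk, rfl⟩; exact ⟨k, hk, rfl⟩
  have hmemvalsB : ∀ w : Int, w ∈ (runsOf s).map (·.1) ↔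
      ∃ k, k ∈ array ∧ w = (array.count k : Int) := by
    intro w
    simp only [List.mem_map]
    constructor
    · rintro ⟨r, hr, rfl⟩
      exact ⟨r.2, (hmems r.2).mp ((rmem r.2).mp (List.mem_map_of_mem hr)),
        by rw [rcnt r hr, hcountseq]⟩
    · rintro ⟨k, hk, rfl⟩
      obtain ⟨r, hr, hrk⟩ := List.mem_map.mp ((rmem k).mpr ((hmems k).mpr hk))
      exact ⟨r, hr, by rw [rcnt r hr, hrk, hcountseq]⟩
  have hAne : (PySem.Dict.counter array).values ≠ [] := by
    intro h
    have := (hmemvalsA _).mpr ⟨a0, ha0, rfl⟩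
    simp [h] at this
  have hBne : (runsOf s).map (·.1) ≠ [] := by
    intro h
    have := (hmemvalsB _).mpr ⟨a0, ha0, rfl⟩
    simp [h] at this
  obtain ⟨mA, hmA⟩ : ∃ m, PySem.List.max? (PySem.Dict.counter array).values (fun v => v) = some m := by
    cases h : PySem.List.max? (PySem.Dict.counter array).values (fun v => v) with
    | none => rw [PySem.List.max?_eq_none_iff] at h; exact absurd h hAne
    | some m => exact ⟨m, rfl⟩
  obtain ⟨mB, hmB⟩ : ∃ m, PySem.List.max? ((runsOf s).map (·.1)) (fun c => c) = some m := by
    cases h : PySem.List.max? ((runsOf s).map (·.1)) (fun c => c) with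
    | none => rw [PySem.List.max?_eq_none_iff] at h; exact absurd h hBne
    | some m => exact ⟨m, rfl⟩
  have hmAB : mA = mB := by
    have h1 : mA ∈ (PySem.Dict.counter array).values := PySem.List.max?_mem hmA
    have h2 : mB ∈ (runsOf s).map (·.1) := PySem.List.max?_mem hmB
    have le1 : mA ≤ mB := PySem.List.max?_isMax hmB mA ((hmemvalsB mA).mpr ((hmemvalsA mA).mp h1))
    have le2 : mB ≤ mA := PySem.List.max?_isMax hmA mB ((hmemvalsA mB).mpr ((hmemvalsB mB).mp h2))
    omega
  have hvA : (PySem.Dict.counter array).items.foldl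
      (fun v kv => if kv.2 == mA then v ++ [kv.1] else v) ([] : List Int)
      = (PySem.Set.ofList array).filter (fun k => (((array.count k : Nat) : Int) == mA)) := by
    rw [PySem.List.foldl_append_if, hitems, List.filter_map]
    simp [List.map_map, Function.comp_def]
  have hndA : ((PySem.Set.ofList array).filter
      (fun k => (((array.count k : Nat) : Int) == mA))).Nodup :=
    (PySem.Set.nodup_ofList array).filter _
  have hndB : (((runsOf s).filter (fun r => r.1 == mA)).map (·.2)).Nodup :=
    rnd.sublist (List.Sublist.map (·.2) (List.filter_sublist (l := runsOf s) (p := fun r => r.1 == mA)))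
  have hmemAB : ∀ k, k ∈ (PySem.Set.ofList array).filter
        (fun k => (((array.count k : Nat) : Int) == mA))
      ↔ k ∈ ((runsOf s).filter (fun r => r.1 == mA)).map (·.2) := by
    intro k
    simp only [List.mem_filter, PySem.Set.mem_ofList, List.mem_map]
    constructor
    · rintro ⟨hk, hck⟩
      obtain ⟨r, hr, hrk⟩ := List.mem_map.mp ((rmem k).mpr ((hmems k).mpr hk))
      refine ⟨r, ⟨hr, ?_⟩, hrk⟩
      rw [rcnt r hr, hrk, hcountseq]
      exact hck
    · rintro ⟨r, ⟨hr1, hr2⟩, hrk⟩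
      subst hrk
      refine ⟨(hmems r.2).mp ((rmem r.2).mp (List.mem_map_of_mem hr1)), ?_⟩
      rw [← hcountseq, ← rcnt r hr1]
      exact hr2
  have hpermAB := (List.perm_ext_iff_of_nodup hndA hndB).mpr hmemAB
  have hlen := hpermAB.length_eq
  simp only [solution, solution_alt, ← hsdef]
  rw [hdic, hmA, hmB]
  dsimp only
  rw [hvA, ← hmAB, hlen]
  split_ifs with h
  · obtain ⟨a, ha⟩ := List.length_eq_one_iff.mp (hlen ▸ h)
    obtain ⟨b, hb⟩ := List.length_eq_one_iff.mp h
    have hab : a ∈ [b] := hb ▸ ((hmemAB a).mp (by simp [ha]))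
    simp at hab
    rw [ha, hb, hab]
  · rfl
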